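-- pv_equiv track=rewrite | github.com/AlexHoztUCT/Proyect1-Progra3 | Proyecto/visual/dashboard.py | generate_unique_ids
-- ===== SOURCE A (Python) =====
-- def generate_unique_ids(n):
--     """Genera IDs al estilo Excel (A, B, ..., Z, AA, AB, etc.)"""
--     ids = []
--     i = 0
--     while len(ids) < n:
--         s = ""
--         temp = i
--         while True:
--             s = chr(ord('A') + temp % 26) + s
--             temp = temp // 26 - 1
--             if temp < 0:
--                 break
--         ids.append(s)
--         i += 1
--     return ids
-- ===== SOURCE B (Python) =====
-- def _incr(ds):
--     """Increment a little-endian bijective-base-26 odometer (digits 0-25)."""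
--     if not ds:
--         return [0]
--     if ds[0] == 25:
--         return [0] + _incr(ds[1:])
--     return [ds[0] + 1] + ds[1:]
--
--
-- def generate_unique_ids(n):
--     """Genera IDs al estilo Excel (A, B, ..., Z, AA, AB, etc.)"""
--     ids = []
--     cur = []
--     k = 0
--     while k < n:
--         cur = _incr(cur)
--         ids.append(''.join(chr(ord('A') + d) for d in reversed(cur)))
--         k += 1
--     return ids
-- ===== Notes on version B (the rewrite author's own statement) =====
-- stated objective: alternative
-- what changed: B replaces the per-index bijective-base-26 division loop with an odometer: it keeps the current label's digit list and increments it (with carry) once per output, never dividing an index.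
import Mathlib
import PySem

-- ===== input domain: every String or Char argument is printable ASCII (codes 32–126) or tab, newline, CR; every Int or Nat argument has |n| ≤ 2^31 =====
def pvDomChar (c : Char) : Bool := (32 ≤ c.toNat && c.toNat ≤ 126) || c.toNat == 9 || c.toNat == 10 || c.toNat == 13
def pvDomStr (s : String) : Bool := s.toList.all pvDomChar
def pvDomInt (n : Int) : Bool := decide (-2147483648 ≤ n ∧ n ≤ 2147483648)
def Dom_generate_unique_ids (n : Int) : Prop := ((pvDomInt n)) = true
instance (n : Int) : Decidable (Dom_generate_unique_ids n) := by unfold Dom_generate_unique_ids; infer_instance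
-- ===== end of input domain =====

-- B replaces A's per-index bijective-base-26 division loop by an odometer that is
-- incremented (with carry) once per emitted label; alternative decomposition, same cost.

-- ===== PORT A =====
-- inner 'while True' loop of A: prepend chr(ord('A') + temp % 26), temp = temp // 26 - 1, stop when temp < 0
def pvLabelA (temp : Int) (s : List Char) : List Char :=
  let s' := Char.ofNat (65 + PySem.Int.mod temp 26).toNat :: s
  let temp' := PySem.Int.floordiv temp 26 - 1
  if _h : temp' < 0 then s'
  else pvLabelA temp' s'
termination_by temp.toNat
decreasing_by
  have h1 : (1 : Int) ≤ PySem.Int.floordiv temp 26 := by omega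
  have h2 : (1 : Int) * 26 ≤ temp := (PySem.Int.le_floordiv_iff_mul_le (by norm_num)).mp h1
  have h3 : PySem.Int.floordiv temp 26 < temp + 1 :=
    (PySem.Int.floordiv_lt_iff_lt_mul (by norm_num)).mpr (by omega)
  omega

-- outer 'while len(ids) < n' loop of A
def pvLoopA (n : Int) (ids : List String) (i : Int) : List String :=
  if _h : (ids.length : Int) < n then
    pvLoopA n (ids ++ [String.mk (pvLabelA i [])]) (i + 1)
  else ids
termination_by (n - ids.length).toNat
decreasing_by simp only [List.length_append, List.length_cons, List.length_nil]; omega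

def generate_unique_ids (n : Int) : List String := pvLoopA n [] 0

-- ===== PORT B =====
-- _incr: increment a little-endian digit list (digits 0–25), carrying on 25
def pvIncr : List Int → List Int
  | [] => [0]
  | d :: ds => if d = 25 then 0 :: pvIncr ds else (d + 1) :: ds

-- 'while k < n' loop of B: increment the odometer, render it big-endian, append
def pvLoopB (n : Int) (ids : List String) (cur : List Int) (k : Int) : List String :=
  if _h : k < n then
    let cur' := pvIncr cur
    pvLoopB n (ids ++ [String.mk (cur'.reverse.map (fun d => Char.ofNat (65 + d).toNat))]) cur' (k + 1)
  else ids
termination_by (n - k).toNat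
decreasing_by omega

def generate_unique_ids_alt (n : Int) : List String := pvLoopB n [] [] 0

-- ===== PRECONDITION & SPEC =====
def Spec_generate_unique_ids (n : Int) (out : List String) : Prop := out = generate_unique_ids_alt n
instance (n : Int) (out : List String) : Decidable (Spec_generate_unique_ids n out) := by unfold Spec_generate_unique_ids; infer_instance

-- ===== CLAIM (what is proved, stated in full; the proofs are below) =====
def Claim_equal_generate_unique_ids : Prop := ∀ (n : Int), Dom_generate_unique_ids n → Spec_generate_unique_ids n (generate_unique_ids n)

-- ===== LEMMAS AND PROOFS =====

-- little-endian digit list of the i-th label (0 ↦ [0] = "A", 25 ↦ [25] = "Z", 26 ↦ [0,0] = "AA", …)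
def pvDigs (i : Nat) : List Int :=
  if i < 26 then [(i : Int)]
  else ((i % 26 : Nat) : Int) :: pvDigs (i / 26 - 1)
termination_by i
decreasing_by omega

-- odometer value before the k-th increment: [] initially, pvDigs (k-1) afterwards
def pvCk : Nat → List Int
  | 0 => []
  | k + 1 => pvDigs k

lemma pv_incr_digs : ∀ i : Nat, pvIncr (pvDigs i) = pvDigs (i + 1) := by
  intro i
  induction i using Nat.strong_induction_on with
  | _ i ih =>
    by_cases h : i < 26
    · by_cases h25 : i = 25
      · subst h25
        have e25 : pvDigs 25 = [(25 : Int)] := by rw [pvDigs]; norm_num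
        have e0 : pvDigs 0 = [(0 : Int)] := by rw [pvDigs]; norm_num
        have e26 : pvDigs 26 = (0 : Int) :: pvDigs 0 := by rw [pvDigs]; norm_num
        rw [e25, show (25 : Nat) + 1 = 26 from rfl, e26, e0]
        simp [pvIncr]
      · have ei : pvDigs i = [(i : Int)] := by rw [pvDigs]; simp [h]
        have ei1 : pvDigs (i + 1) = [((i + 1 : Nat) : Int)] := by
          rw [pvDigs]; simp [show i + 1 < 26 by omega]
        rw [ei, ei1]
        simp only [pvIncr, if_neg (show ¬ ((i : Int) = 25) by omega)]
        congr 1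
    · have ei : pvDigs i = ((i % 26 : Nat) : Int) :: pvDigs (i / 26 - 1) := by
        rw [pvDigs]; simp [h]
      have ei1 : pvDigs (i + 1) = (((i + 1) % 26 : Nat) : Int) :: pvDigs ((i + 1) / 26 - 1) := by
        rw [pvDigs]; simp [show ¬ (i + 1 < 26) by omega]
      rw [ei, ei1]
      by_cases h25 : i % 26 = 25
      · have hc : ((i % 26 : Nat) : Int) = 25 := by omega
        simp only [pvIncr, hc, if_true]
        have hih := ih (i / 26 - 1) (by omega)
        have hdiv : i / 26 - 1 + 1 = i / 26 := by omega
        rw [hih, hdiv]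
        have h1 : (i + 1) % 26 = 0 := by omega
        have h2 : (i + 1) / 26 - 1 = i / 26 := by omega
        rw [h1, h2]
        norm_num
      · have hc : ¬ (((i % 26 : Nat) : Int) = 25) := by omega
        simp only [pvIncr, hc, if_false]
        have h1 : (i + 1) % 26 = i % 26 + 1 := by omega
        have h2 : (i + 1) / 26 - 1 = i / 26 - 1 := by omega
        rw [h1, h2]
        congr 1

lemma pv_incr_C (k : Nat) : pvIncr (pvCk k) = pvDigs k := by
  cases k with
  | zero => rw [pvDigs]; norm_num [pvCk, pvIncr]
  | succ k => exact pv_incr_digs k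

lemma pv_label_digs : ∀ (i : Nat) (s : List Char),
    pvLabelA (i : Int) s = (pvDigs i).reverse.map (fun d => Char.ofNat (65 + d).toNat) ++ s := by
  intro i
  induction i using Nat.strong_induction_on with
  | _ i ih =>
    intro s
    have hm : PySem.Int.mod (i : Int) 26 = ((i % 26 : Nat) : Int) := by
      rw [PySem.Int.mod_eq_emod_of_pos (by norm_num)]; omega
    have hd : PySem.Int.floordiv (i : Int) 26 = ((i / 26 : Nat) : Int) := by
      rw [PySem.Int.floordiv_eq_ediv_of_pos (by norm_num)]; omega
    rw [pvLabelA]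
    simp only [hm, hd]
    by_cases h : i < 26
    · have hlt : ((i / 26 : Nat) : Int) - 1 < 0 := by omega
      have him : i % 26 = i := by omega
      have ei : pvDigs i = [(i : Int)] := by rw [pvDigs]; simp [h]
      rw [dif_pos hlt, ei]
      simp [him]
    · have hge : ¬ (((i / 26 : Nat) : Int) - 1 < 0) := by omega
      rw [dif_neg hge]
      have hcast : ((i / 26 : Nat) : Int) - 1 = ((i / 26 - 1 : Nat) : Int) := by omega
      rw [hcast, ih (i / 26 - 1) (by omega)]
      have ei : pvDigs i = ((i % 26 : Nat) : Int) :: pvDigs (i / 26 - 1) := by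
        rw [pvDigs]; simp [h]
      rw [ei]
      simp

lemma pv_loops : ∀ (m : Nat) (n : Int) (ids : List String) (k : Nat),
    (n - k).toNat = m → ids.length = k →
    pvLoopA n ids (k : Int) = pvLoopB n ids (pvCk k) (k : Int) := by
  intro m
  induction m with
  | zero =>
    intro n ids k hm hlen
    rw [pvLoopA, pvLoopB]
    have : ¬ ((k : Int) < n) := by omega
    rw [hlen]
    simp [this]
  | succ m ihm =>
    intro n ids k hm hlen
    rw [pvLoopA, pvLoopB]
    by_cases h : (k : Int) < n
    · rw [dif_pos (by rw [hlen]; exact h), dif_pos h]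
      have hstr : String.mk (pvLabelA (k : Int) []) =
          String.mk ((pvIncr (pvCk k)).reverse.map (fun d => Char.ofNat (65 + d).toNat)) := by
        rw [pv_incr_C, pv_label_digs k []]
        simp
      have hcast : (k : Int) + 1 = ((k + 1 : Nat) : Int) := by push_cast; ring
      rw [hstr, hcast]
      have hC : pvIncr (pvCk k) = pvCk (k + 1) := by rw [pv_incr_C]; rfl
      rw [hC]
      exact ihm n _ (k + 1) (by omega) (by simp [hlen])
    · rw [dif_neg (by rw [hlen]; exact h), dif_neg h]

theorem pv_main (n : Int) : generate_unique_ids n = generate_unique_ids_alt n := by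
  unfold generate_unique_ids generate_unique_ids_alt
  have := pv_loops (n - 0).toNat n [] 0 rfl rfl
  simpa [pvCk] using this

-- ===== VERDICT (by name: the statement is the Claim_ definition above) =====
theorem generate_unique_ids_spec : Claim_equal_generate_unique_ids := by
  intro n _
  unfold Spec_generate_unique_ids
  exact pv_main n
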